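-- pv_equiv track=rewrite | github.com/yongho1212/Algorithm_Basic | 3/3-pr.py | mate
-- ===== SOURCE A (Python) =====
-- def mate(a):
--     n = len(a)
--     result = set()
--     for i in range(0, n-1):
--         for j in range(i+1, n):
--             if a[i] != a[j]:
--                 result.add(a[i] + "-" + a[j])
--     return result
-- ===== SOURCE B (Python) =====
-- def mate(a):
--     # scan the suffix only once per distinct value: first occurrence index per value
--     first = {}
--     for i, x in enumerate(a):
--         if x not in first:
--             first[x] = i
--     result = set()
--     for x, i in first.items():
--         for y in a[i + 1:]:
--             if y != x:
--                 result.add(x + "-" + y)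
--     return result
-- ===== Notes on version B (the rewrite author's own statement) =====
-- stated objective: alternative
-- what changed: B precomputes the first-occurrence index of each distinct value in one dict pass and runs the inner suffix scan only once per distinct value instead of once per position, so duplicate occurrences of a value are never rescanned.
import Mathlib
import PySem

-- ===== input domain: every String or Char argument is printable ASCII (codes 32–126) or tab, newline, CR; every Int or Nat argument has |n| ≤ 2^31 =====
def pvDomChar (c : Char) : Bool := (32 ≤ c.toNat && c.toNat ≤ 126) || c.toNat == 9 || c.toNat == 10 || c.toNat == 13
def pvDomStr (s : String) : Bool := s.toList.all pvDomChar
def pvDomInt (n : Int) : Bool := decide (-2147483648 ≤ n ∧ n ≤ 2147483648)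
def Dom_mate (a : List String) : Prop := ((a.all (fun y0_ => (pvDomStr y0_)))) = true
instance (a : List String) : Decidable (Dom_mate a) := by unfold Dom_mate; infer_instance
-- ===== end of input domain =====

-- B replaces A's scan over all index pairs by a first-occurrence-index pass: duplicate
-- occurrences of a value contribute nothing new, so B runs the inner suffix scan only
-- once per distinct value (objective: alternative algorithm, same result).

-- ===== PORT A =====
def mate (a : List String) : List String :=
  let n : Int := PySem.List.len a
  (PySem.List.pyRange 0 (n - 1) 1).foldl (fun result i =>
    (PySem.List.pyRange (i + 1) n 1).foldl (fun result j =>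
      if PySem.List.pyGetD a i "" ≠ PySem.List.pyGetD a j "" then
        PySem.Set.add result (PySem.List.pyGetD a i "" ++ "-" ++ PySem.List.pyGetD a j "")
      else result) result) PySem.Set.empty

-- ===== PORT B =====
def mate_alt (a : List String) : List String :=
  let first : PySem.Dict String Int :=
    (PySem.List.enumerate a 0).foldl
      (fun d p => if d.contains p.2 then d else d.insert p.2 p.1) PySem.Dict.empty
  first.items.foldl (fun result p =>
    (PySem.List.slice a (some (p.2 + 1)) none).foldl
      (fun result y => if y ≠ p.1 then PySem.Set.add result (p.1 ++ "-" ++ y) else result)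
      result) PySem.Set.empty

-- ===== PRECONDITION & SPEC =====
def Spec_mate (a : List String) (out : List String) : Prop := out = mate_alt a
instance (a : List String) (out : List String) : Decidable (Spec_mate a out) := by unfold Spec_mate; infer_instance

-- ===== CLAIM (what is proved, stated in full; the proofs are below) =====
def Claim_equal_mate : Prop := ∀ (a : List String), Dom_mate a → Spec_mate a (mate a)

-- ===== LEMMAS AND PROOFS =====

/-- One inner pass: add `x-y` for every `y` in `ys` with `y ≠ x`. -/
def pvF (x : String) (ys : List String) (s : List String) : List String :=
  ys.foldl (fun s y => if y ≠ x then PySem.Set.add s (x ++ "-" ++ y) else s) s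

/-- A's loop, structurally: one inner pass per position. -/
def pvG (s : List String) : List String → List String
  | [] => s
  | x :: r => pvG (pvF x r s) r

/-- First-occurrence pairs (value, index), in first-occurrence order. -/
def pvFirstPairs : List String → Int → List (String × Int)
  | [], _ => []
  | x :: r, i => (x, i) :: (pvFirstPairs r (i + 1)).filter (fun p => !(p.1 == x))

/-- Same, but carrying the suffix after the first occurrence instead of its index. -/
def pvFirstRests : List String → List (String × List String)
  | [] => []
  | x :: r => (x, r) :: (pvFirstRests r).filter (fun p => !(p.1 == x))

/-- Invariant: every pair `x-y` with `x` already handled and `y` still ahead is in `s`. -/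
def pvInv (seen : List String) (s : List String) (xs : List String) : Prop :=
  ∀ x ∈ seen, ∀ y ∈ xs, y ≠ x → (x ++ "-" ++ y) ∈ s

theorem pvF_mem_of_mem {z : String} (x : String) (ys : List String) (s : List String)
    (h : z ∈ s) : z ∈ pvF x ys s := by
  induction ys generalizing s with
  | nil => exact h
  | cons y ys ih =>
    simp only [pvF, List.foldl_cons] at *
    split
    · exact ih _ ((PySem.Set.mem_add s _ z).mpr (Or.inl h))
    · exact ih _ h

theorem pvF_mem_pair {x y : String} (ys : List String) (s : List String)
    (hy : y ∈ ys) (hne : y ≠ x) : (x ++ "-" ++ y) ∈ pvF x ys s := by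
  induction ys generalizing s with
  | nil => cases hy
  | cons y' ys ih =>
    simp only [pvF, List.foldl_cons]
    rcases List.mem_cons.mp hy with rfl | hy'
    · simp only [if_pos hne]
      exact pvF_mem_of_mem _ _ _ ((PySem.Set.mem_add s _ _).mpr (Or.inr rfl))
    · split
      · exact ih _ hy'
      · exact ih _ hy'

theorem pvF_noop (x : String) (ys : List String) (s : List String)
    (h : ∀ y ∈ ys, y ≠ x → (x ++ "-" ++ y) ∈ s) : pvF x ys s = s := by
  induction ys with
  | nil => rfl
  | cons y ys ih =>
    simp only [pvF, List.foldl_cons]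
    split
    · have hmem : (x ++ "-" ++ y) ∈ s := h y (List.mem_cons_self) (by assumption)
      have : PySem.Set.add s (x ++ "-" ++ y) = s := by
        simp [PySem.Set.add, hmem]
      rw [this]
      exact ih (fun y hy hne => h y (List.mem_cons_of_mem _ hy) hne)
    · exact ih (fun y hy hne => h y (List.mem_cons_of_mem _ hy) hne)

/-- Main lemma: A's full scan equals the filtered first-occurrence fold. -/
theorem pvMain (xs : List String) (seen : List String) (s : List String)
    (hinv : pvInv seen s xs) :
    pvG s xs =
      ((pvFirstRests xs).filter (fun p => !decide (p.1 ∈ seen))).foldl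
        (fun s p => pvF p.1 p.2 s) s := by
  induction xs generalizing seen s with
  | nil => rfl
  | cons x r ih =>
    have hinv_r : pvInv seen s r :=
      fun z hz y hy hne => hinv z hz y (List.mem_cons_of_mem _ hy) hne
    simp only [pvG, pvFirstRests, List.filter_cons, List.filter_filter]
    by_cases hx : x ∈ seen
    · rw [pvF_noop x r s (fun y hy hne => hinv x hx y (List.mem_cons_of_mem _ hy) hne)]
      rw [if_neg (by simp [hx])]
      rw [ih seen s hinv_r]
      have hfe : List.filter (fun p => (!decide (p.1 ∈ seen)) && !(p.1 == x)) (pvFirstRests r)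
          = List.filter (fun p => !decide (p.1 ∈ seen)) (pvFirstRests r) :=
        List.filter_congr (fun p _ => by
          by_cases hpx : p.1 = x
          · simp [hpx, hx]
          · simp [hpx])
      rw [hfe]
    · have hinv' : pvInv (x :: seen) (pvF x r s) r := by
        intro z hz y hy hne
        rcases List.mem_cons.mp hz with rfl | hz'
        · exact pvF_mem_pair r s hy hne
        · exact pvF_mem_of_mem _ _ _ (hinv z hz' y (List.mem_cons_of_mem _ hy) hne)
      rw [if_pos (by simp [hx]), List.foldl_cons, ih (x :: seen) (pvF x r s) hinv']
      have hfe : List.filter (fun p => !decide (p.1 ∈ x :: seen)) (pvFirstRests r)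
          = List.filter (fun p => (!decide (p.1 ∈ seen)) && !(p.1 == x)) (pvFirstRests r) :=
        List.filter_congr (fun p _ => by
          by_cases hpx : p.1 = x
          · simp [hpx, List.mem_cons]
          · simp [hpx, List.mem_cons])
      rw [hfe]

/-- A's inner loop is one `pvF` pass over the suffix. -/
theorem pvA_inner (a : List String) (i : Int) (s : List String) (hi : 0 ≤ i) :
    (PySem.List.pyRange (i + 1) (PySem.List.len a) 1).foldl (fun result j =>
      if PySem.List.pyGetD a i "" ≠ PySem.List.pyGetD a j "" then
        PySem.Set.add result (PySem.List.pyGetD a i "" ++ "-" ++ PySem.List.pyGetD a j "")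
      else result) s
    = pvF (PySem.List.pyGetD a i "") (a.drop (i + 1).toNat) s := by
  rw [PySem.List.foldl_pyRange_pyGetD a ""
    (fun result y => if PySem.List.pyGetD a i "" ≠ y then
        PySem.Set.add result (PySem.List.pyGetD a i "" ++ "-" ++ y) else result) s
    (by omega : (0:Int) ≤ i + 1)]
  unfold pvF
  exact PySem.List.foldl_congr_mem _ _ _ _ (fun acc y _ => by
    by_cases h : y = PySem.List.pyGetD a i "" <;> simp [h, eq_comm])

theorem pvRangeFold : ∀ (xs : List String) (s : List String),
    (List.range (xs.length - 1)).foldl (fun s k => pvF (xs.getD k "") (xs.drop (k+1)) s) s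
      = pvG s xs := by
  intro xs
  induction xs with
  | nil => intro s; rfl
  | cons x r ih =>
    intro s
    cases r with
    | nil => rfl
    | cons y r' =>
      show (List.range ((y :: r').length)).foldl _ s = _
      rw [show (y :: r').length = ((y :: r').length - 1) + 1 from rfl, List.range_succ_eq_map,
        List.foldl_cons, List.foldl_map]
      have hbody : ∀ (s : List String), ∀ k ∈ List.range ((y :: r').length - 1),
          pvF ((x :: y :: r').getD (Nat.succ k) "") ((x :: y :: r').drop (Nat.succ k + 1)) s
          = pvF ((y :: r').getD k "") ((y :: r').drop (k + 1)) s := by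
        intro s k _
        rfl
      rw [PySem.List.foldl_congr_mem _ _ _ _ hbody]
      exact ih _

theorem pvA_eq (a : List String) : mate a = pvG PySem.Set.empty a := by
  show (PySem.List.pyRange 0 (PySem.List.len a - 1) 1).foldl _ _ = _
  rw [PySem.List.pyRange_one, List.foldl_map]
  have hbody : ∀ (s : List String), ∀ k ∈ List.range ((PySem.List.len a - 1) - 0).toNat,
      (PySem.List.pyRange ((0 + (k:Int)) + 1) (PySem.List.len a) 1).foldl (fun result j =>
        if PySem.List.pyGetD a (0 + (k:Int)) "" ≠ PySem.List.pyGetD a j "" then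
          PySem.Set.add result (PySem.List.pyGetD a (0 + (k:Int)) "" ++ "-" ++ PySem.List.pyGetD a j "")
        else result) s
      = pvF (a.getD k "") (a.drop (k + 1)) s := by
    intro s k _
    rw [pvA_inner a (0 + (k:Int)) s (by omega)]
    have h1 : (0 + (k:Int)) = (k:Int) := by omega
    have h2 : ((k:Int) + 1).toNat = k + 1 := by omega
    rw [h1, h2, PySem.List.pyGetD_natCast]
  rw [PySem.List.foldl_congr_mem _ _ _ _ hbody]
  have h3 : ((PySem.List.len a - 1) - 0).toNat = a.length - 1 := by
    simp [PySem.List.len]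
  rw [h3, pvRangeFold]

/-- `contains` after an insert. -/
theorem pvContains_insert (d : PySem.Dict String Int) (x z : String) (i : Int) :
    (d.insert x i).contains z = if z = x then true else d.contains z := by
  rw [PySem.Dict.contains_eq_isSome_get?, PySem.Dict.get?_insert,
    PySem.Dict.contains_eq_isSome_get?]
  by_cases h : z = x <;> simp [h]

theorem pvDictFold : ∀ (l : List String) (i : Int) (d : PySem.Dict String Int),
    ((PySem.List.enumerate l i).foldl
        (fun d p => if d.contains p.2 then d else d.insert p.2 p.1) d).items
    = d.items ++ (pvFirstPairs l i).filter (fun p => !(d.contains p.1)) := by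
  intro l
  induction l with
  | nil => intro i d; simp [pvFirstPairs, PySem.List.enumerate_nil]
  | cons x r ih =>
    intro i d
    rw [PySem.List.enumerate_cons, List.foldl_cons]
    simp only [pvFirstPairs, List.filter_cons, List.filter_filter]
    by_cases hx : d.contains x = true
    · rw [if_pos hx, ih (i + 1) d, if_neg (by simp [hx])]
      congr 1
      apply List.filter_congr
      intro p _
      by_cases hpx : p.1 = x
      · simp [hpx, hx]
      · simp [hpx]
    · have hx' : d.contains x = false := by simpa using hx
      rw [if_neg (by simp [hx']), ih (i + 1) (d.insert x i),
        PySem.Dict.items_insert_of_not_contains d i hx', if_pos (by simp [hx']),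
        List.append_assoc]
      congr 1
      rw [List.singleton_append]
      congr 1
      apply List.filter_congr
      intro p _
      by_cases hpx : p.1 = x
      · simp [hpx]
      · simp [pvContains_insert, hpx]

theorem pvFPmem : ∀ (xs : List String) (i : Int) (p : String × Int),
    p ∈ pvFirstPairs xs i → i ≤ p.2 := by
  intro xs
  induction xs with
  | nil => intro i p h; cases h
  | cons x r ih =>
    intro i p h
    rcases List.mem_cons.mp h with rfl | h'
    · exact le_refl i
    · have := ih (i + 1) p (List.mem_of_mem_filter h')
      omega

theorem pvMapFR : ∀ (xs : List String) (i : Int) (a : List String), 0 ≤ i →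
    a.drop i.toNat = xs →
    (pvFirstPairs xs i).map (fun p => (p.1, a.drop (p.2 + 1).toNat)) = pvFirstRests xs := by
  intro xs
  induction xs with
  | nil => intro i a _ _; rfl
  | cons x r ih =>
    intro i a hi hd
    have hr : a.drop (i + 1).toNat = r := by
      have h1 : (i + 1).toNat = i.toNat + 1 := by omega
      rw [h1, ← List.drop_drop, hd]
      rfl
    simp only [pvFirstPairs, pvFirstRests, List.map_cons]
    congr 1
    · rw [hr]
    · rw [← ih (i + 1) a (by omega) hr, List.filter_map]
      rfl

theorem pvB_eq (a : List String) :
    mate_alt a = (pvFirstRests a).foldl (fun s p => pvF p.1 p.2 s) PySem.Set.empty := by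
  show ((PySem.List.enumerate a 0).foldl
      (fun d p => if d.contains p.2 then d else d.insert p.2 p.1) PySem.Dict.empty).items.foldl
      _ PySem.Set.empty = _
  rw [pvDictFold a 0 PySem.Dict.empty]
  have h0 : (PySem.Dict.empty : PySem.Dict String Int).items
      ++ (pvFirstPairs a 0).filter (fun p => !((PySem.Dict.empty : PySem.Dict String Int).contains p.1))
      = pvFirstPairs a 0 := by
    simp [PySem.Dict.empty]
  rw [h0]
  have hbody : ∀ (s : List String), ∀ p ∈ pvFirstPairs a 0,
      (PySem.List.slice a (some (p.2 + 1)) none).foldl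
        (fun result y => if y ≠ p.1 then PySem.Set.add result (p.1 ++ "-" ++ y) else result) s
      = pvF p.1 (a.drop (p.2 + 1).toNat) s := by
    intro s p hp
    have := pvFPmem a 0 p hp
    rw [PySem.List.slice_from a (by omega : (0:Int) ≤ p.2 + 1)]
    rfl
  rw [PySem.List.foldl_congr_mem _ _ _ _ hbody,
    ← pvMapFR a 0 a (le_refl 0) (by simp), List.foldl_map]

-- ===== VERDICT (by name: the statement is the Claim_ definition above) =====
theorem mate_spec : Claim_equal_mate := by
  intro a _
  show mate a = mate_alt a
  rw [pvA_eq, pvB_eq, pvMain a [] PySem.Set.empty (by intro x hx; cases hx)]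
  simp
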